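-- pv_equiv track=rewrite | github.com/rogerrojur/nl2sql | code/sqlova/utils/utils_wikisql.py | get_next_large_index
-- ===== SOURCE A (Python) =====
-- def get_next_large_index(arr_origin, cur):
--     arr = list(arr_origin) if type(arr_origin) != type([]) else arr_origin
--     if min(arr) != arr[cur]:
--         prob_list = []
--         value_list = []
--         for i, e in enumerate(arr):
--             if e < arr[cur]:
--                 prob_list.append(i)
--                 value_list.append(e)
--         min_value = min(value_list)
--         for i, e in enumerate(value_list):
--             if e == min_value:
--                 return prob_list[i]
--     return None
-- ===== SOURCE B (Python) =====
-- def get_next_large_index(arr_origin, cur):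
--     arr = list(arr_origin)
--     target = arr[cur]
--     best_idx, best_val = 0, arr[0]
--     for i, e in enumerate(arr):
--         if e < best_val:
--             best_idx, best_val = i, e
--     return None if best_val == target else best_idx
-- ===== Notes on version B (the rewrite author's own statement) =====
-- stated objective: simpler
-- what changed: Replaced A's filter-build (two parallel lists), second min() and rescan-with-index by a single accumulator pass keeping the running minimum's value and first index, then one comparison against arr[cur].
import Mathlib
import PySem

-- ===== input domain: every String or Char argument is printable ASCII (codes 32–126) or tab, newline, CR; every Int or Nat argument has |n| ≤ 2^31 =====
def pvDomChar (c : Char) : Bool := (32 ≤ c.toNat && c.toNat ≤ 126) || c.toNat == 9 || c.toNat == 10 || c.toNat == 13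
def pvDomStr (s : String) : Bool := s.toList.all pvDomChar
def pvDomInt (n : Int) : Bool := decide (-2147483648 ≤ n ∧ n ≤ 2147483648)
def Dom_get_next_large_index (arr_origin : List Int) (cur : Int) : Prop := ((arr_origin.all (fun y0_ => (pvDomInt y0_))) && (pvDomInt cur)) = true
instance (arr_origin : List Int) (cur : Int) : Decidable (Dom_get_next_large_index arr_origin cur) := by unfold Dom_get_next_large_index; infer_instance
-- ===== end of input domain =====

-- B changes structure only (one accumulator pass instead of filter lists + second min + rescan); return values proved equal on Pre_.

-- ===== PORT A =====
-- the second Python loop: 'for i, e in enumerate(value_list): if e == min_value: return prob_list[i]'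
def pvGoA (mv : Int) (ps : List Int) : Int → List Int → Option Int
  | _, [] => none
  | i, e :: rest => if e = mv then PySem.List.pyGet? ps i else pvGoA mv ps (i + 1) rest

def get_next_large_index (arr_origin : List Int) (cur : Int) : Option Int :=
  match PySem.List.min? arr_origin (fun x => x), PySem.List.pyGet? arr_origin cur with
  | some m, some c =>
      if m ≠ c then
        -- first loop: build prob_list / value_list by appending
        let pv := (PySem.List.enumerate arr_origin).foldl
          (fun (acc : List Int × List Int) ie =>
            if ie.2 < c then (acc.1 ++ [ie.1], acc.2 ++ [ie.2]) else acc) ([], [])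
        match PySem.List.min? pv.2 (fun x => x) with
        | some mv => pvGoA mv pv.1 0 pv.2
        | none => none
      else none
  | _, _ => none

-- ===== PORT B =====
def get_next_large_index_alt (arr_origin : List Int) (cur : Int) : Option Int :=
  match PySem.List.pyGet? arr_origin cur with
  | none => none
  | some target =>
    match PySem.List.pyGet? arr_origin 0 with
    | none => none
    | some a0 =>
      let b := (PySem.List.enumerate arr_origin).foldl
        (fun (b : Int × Int) ie => if ie.2 < b.2 then ie else b) (0, a0)
      if b.2 = target then none else some b.1

-- ===== PRECONDITION & SPEC =====
-- Pre_ excludes exactly the inputs on which A raises: the empty list (min of empty) and cur out of range (IndexError).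
def Pre_get_next_large_index (arr_origin : List Int) (cur : Int) : Prop :=
  arr_origin ≠ [] ∧ PySem.Raise.InRange arr_origin.length cur
instance (arr_origin : List Int) (cur : Int) : Decidable (Pre_get_next_large_index arr_origin cur) := by unfold Pre_get_next_large_index; infer_instance

def pvWitness_get_next_large_index : List Int × Int := ([3, 1, 2, 1], 0)

def Spec_get_next_large_index (arr_origin : List Int) (cur : Int) (out : Option Int) : Prop := out = get_next_large_index_alt arr_origin cur
instance (arr_origin : List Int) (cur : Int) (out : Option Int) : Decidable (Spec_get_next_large_index arr_origin cur out) := by unfold Spec_get_next_large_index; infer_instance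

-- ===== CLAIM (what is proved, stated in full; the proofs are below) =====
def Claim_equal_get_next_large_index : Prop := ∀ (arr_origin : List Int) (cur : Int), Dom_get_next_large_index arr_origin cur → Pre_get_next_large_index arr_origin cur → Spec_get_next_large_index arr_origin cur (get_next_large_index arr_origin cur)

-- ===== LEMMAS AND PROOFS =====

-- A's first loop builds the filtered index/value lists
theorem loopA1 (c : Int) (l : List (Int × Int)) (acc : List Int × List Int) :
    l.foldl (fun (acc : List Int × List Int) ie =>
        if ie.2 < c then (acc.1 ++ [ie.1], acc.2 ++ [ie.2]) else acc) acc
      = (acc.1 ++ (l.filter (fun p => decide (p.2 < c))).map (·.1),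
         acc.2 ++ (l.filter (fun p => decide (p.2 < c))).map (·.2)) := by
  induction l generalizing acc with
  | nil => simp
  | cons p t ih =>
    simp only [List.foldl_cons, List.filter_cons]
    by_cases h : p.2 < c
    · simp [h, ih]
    · simp [h, ih]

-- A's second loop is a find? over the zip of the two parallel lists
theorem go_zip (mv : Int) (vs : List Int) : ∀ (i : Nat) (ps : List Int),
    i + vs.length ≤ ps.length →
    pvGoA mv ps (i : Int) vs = (((ps.drop i).zip vs).find? (fun p => p.2 == mv)).map (·.1) := by
  induction vs with
  | nil => intro i ps _; simp [pvGoA]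
  | cons e rest ih =>
    intro i ps hlen
    have hps : i < ps.length := by simp at hlen; omega
    obtain ⟨q, tl, hdrop⟩ : ∃ q tl, ps.drop i = q :: tl := by
      cases hd : ps.drop i with
      | nil => exfalso; have := List.length_drop (l := ps) (i := i); rw [hd] at this; simp at this; omega
      | cons q tl => exact ⟨q, tl, rfl⟩
    have hq : ps[i]? = some q := by
      rw [← List.head?_drop, hdrop]; rfl
    simp only [pvGoA, hdrop, List.zip_cons_cons, List.find?_cons]
    by_cases h : e = mv
    · simp only [h]
      simp [PySem.List.pyGet?_natCast, hq]
    · have hbeq : (e == mv) = false := by simp [h]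
      simp only [if_neg h, hbeq]
      have : (i : Int) + 1 = ((i + 1 : Nat) : Int) := by push_cast; ring
      rw [this, ih (i + 1) ps (by simp at hlen ⊢; omega)]
      have : ps.drop (i + 1) = tl := by
        rw [← List.drop_drop, hdrop]; rfl
      rw [this]

-- B's fold: shorthand
def pvFB (l : List (Int × Int)) (b : Int × Int) : Int × Int :=
  l.foldl (fun (b : Int × Int) ie => if ie.2 < b.2 then ie else b) b

theorem pvFB_cons (q : Int × Int) (t : List (Int × Int)) (b : Int × Int) :
    pvFB (q :: t) b = pvFB t (if q.2 < b.2 then q else b) := by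
  simp [pvFB]

theorem pvFB_mem (l : List (Int × Int)) (b : Int × Int) : pvFB l b = b ∨ pvFB l b ∈ l := by
  induction l generalizing b with
  | nil => left; rfl
  | cons p t ih =>
    rw [pvFB_cons]
    by_cases h : p.2 < b.2
    · rw [if_pos h]
      rcases ih p with h' | h'
      · right; rw [h']; exact List.mem_cons_self
      · right; exact List.mem_cons_of_mem _ h'
    · rw [if_neg h]
      rcases ih b with h' | h'
      · left; exact h'
      · right; exact List.mem_cons_of_mem _ h'

theorem pvFB_le (l : List (Int × Int)) (b : Int × Int) :
    (pvFB l b).2 ≤ b.2 ∧ ∀ p ∈ l, (pvFB l b).2 ≤ p.2 := by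
  induction l generalizing b with
  | nil => exact ⟨le_refl _, by simp⟩
  | cons q t ih =>
    rw [pvFB_cons]
    by_cases h : q.2 < b.2
    · rw [if_pos h]
      obtain ⟨h1, h2⟩ := ih q
      refine ⟨le_trans h1 (le_of_lt h), ?_⟩
      intro p hp
      rcases List.mem_cons.mp hp with rfl | hp
      · exact h1
      · exact h2 p hp
    · rw [if_neg h]
      obtain ⟨h1, h2⟩ := ih b
      refine ⟨h1, ?_⟩
      intro p hp
      rcases List.mem_cons.mp hp with rfl | hp
      · exact le_trans h1 (le_of_not_gt h)
      · exact h2 p hp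

theorem pvFB_stable (l : List (Int × Int)) (b : Int × Int)
    (h : ∀ p ∈ l, ¬ p.2 < b.2) : pvFB l b = b := by
  induction l generalizing b with
  | nil => rfl
  | cons q t ih =>
    rw [pvFB_cons, if_neg (h q List.mem_cons_self)]
    exact ih b (fun p hp => h p (List.mem_cons_of_mem _ hp))

theorem pvFB_find (l : List (Int × Int)) (b : Int × Int)
    (h : (pvFB l b).2 < b.2) :
    l.find? (fun p => p.2 == (pvFB l b).2) = some (pvFB l b) := by
  induction l generalizing b with
  | nil => exact absurd h (by simp [pvFB])
  | cons q t ih =>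
    rw [pvFB_cons] at h ⊢
    by_cases hq : q.2 < b.2
    · rw [if_pos hq] at h ⊢
      by_cases hlt : (pvFB t q).2 < q.2
      · have hne : (q.2 == (pvFB t q).2) = false := by simp; omega
        rw [List.find?_cons, hne]
        exact ih q hlt
      · have heq : (pvFB t q).2 = q.2 := le_antisymm (pvFB_le t q).1 (le_of_not_gt hlt)
        have hstab : pvFB t q = q := by
          apply pvFB_stable
          intro p hp
          have := (pvFB_le t q).2 p hp
          omega
        rw [hstab, List.find?_cons]
        simp
    · rw [if_neg hq] at h ⊢
      have hne : (q.2 == (pvFB t b).2) = false := by simp; omega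
      rw [List.find?_cons, hne]
      exact ih b h

-- find? commutes with a filter whose predicate is implied
theorem find?_filter_imp {α : Type} (l : List α) (p q : α → Bool)
    (himp : ∀ x, p x = true → q x = true) :
    (l.filter q).find? p = l.find? p := by
  induction l with
  | nil => rfl
  | cons x t ih =>
    rw [List.filter_cons]
    by_cases hq : q x = true
    · rw [if_pos hq, List.find?_cons, List.find?_cons, ih]
    · have hp : p x = false := by
        cases hpx : p x
        · rfl
        · exact absurd (himp x hpx) hq
      rw [if_neg hq, List.find?_cons, hp, ih]

-- foldl min is a member and a lower bound
theorem foldl_min_mem (t : List Int) : ∀ (x : Int), t.foldl min x ∈ x :: t := by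
  induction t with
  | nil => intro x; simp
  | cons y s ih =>
    intro x
    simp only [List.foldl_cons]
    rcases List.mem_cons.mp (ih (min x y)) with h | h
    · rcases min_choice x y with hm | hm <;> rw [h, hm] <;> simp
    · right; exact List.mem_cons_of_mem _ h

theorem foldl_min_le (t : List Int) : ∀ (x : Int), ∀ y ∈ x :: t, t.foldl min x ≤ y := by
  induction t with
  | nil => intro x y hy; simp at hy ⊢; omega
  | cons z s ih =>
    intro x y hy
    simp only [List.foldl_cons]
    rcases List.mem_cons.mp hy with rfl | hy
    · exact le_trans (ih (min y z) _ List.mem_cons_self) (min_le_left _ _)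
    · rcases List.mem_cons.mp hy with rfl | hy
      · exact le_trans (ih (min x y) _ List.mem_cons_self) (min_le_right _ _)
      · exact ih (min x z) y (List.mem_cons_of_mem _ hy)

theorem foldl_min_eq (x : Int) (t : List Int) (m : Int)
    (hmem : m ∈ x :: t) (hle : ∀ y ∈ x :: t, m ≤ y) : t.foldl min x = m :=
  le_antisymm (foldl_min_le t x m hmem) (hle _ (foldl_min_mem t x))

-- min? of a nonempty list of Ints equals m when m is a member and a lower bound
theorem min?_eq_of (xs : List Int) (m : Int) (hmem : m ∈ xs) (hle : ∀ y ∈ xs, m ≤ y) :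
    PySem.List.min? xs (fun x => x) = some m := by
  cases xs with
  | nil => simp at hmem
  | cons x t =>
    rw [PySem.List.min?_id_cons, foldl_min_eq x t m hmem hle]

-- ===== VERDICT (by name: the statement is the Claim_ definition above) =====
theorem get_next_large_index_spec : Claim_equal_get_next_large_index := by
  intro arr cur _ hpre
  obtain ⟨hne, hrange⟩ := hpre
  unfold Spec_get_next_large_index
  -- arr is nonempty
  obtain ⟨a0, t, rfl⟩ : ∃ a0 t, arr = a0 :: t := by
    cases arr with
    | nil => exact absurd rfl hne
    | cons a0 t => exact ⟨a0, t, rfl⟩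
  set arr := a0 :: t with harr
  -- arr[cur] is defined
  obtain ⟨c, hc⟩ : ∃ c, PySem.List.pyGet? arr cur = some c := by
    cases hg : PySem.List.pyGet? arr cur with
    | none => exact absurd hrange ((PySem.List.pyGet?_eq_none_iff arr cur).mp hg)
    | some c => exact ⟨c, rfl⟩
  have hc_mem : c ∈ arr := PySem.List.mem_of_pyGet?_eq_some arr hc
  have h00 : PySem.List.pyGet? arr 0 = some a0 := by
    rw [harr]; exact PySem.List.pyGet?_zero_cons a0 t
  -- the enumerate list and B's fold
  set l := PySem.List.enumerate arr with hl
  set r := pvFB l (0, a0) with hr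
  have hsnd : l.map (·.2) = arr := PySem.List.map_snd_enumerate arr 0
  have hb_mem : ((0 : Int), a0) ∈ l := by
    rw [hl, harr, PySem.List.enumerate_cons]; exact List.mem_cons_self
  -- r.2 is the minimum of arr
  have hr_le : ∀ y ∈ arr, r.2 ≤ y := by
    intro y hy
    rw [← hsnd] at hy
    obtain ⟨p, hp, hpy⟩ := List.mem_map.mp hy
    rw [← hpy]
    exact (pvFB_le l (0, a0)).2 p hp
  have hr_mem_arr : r.2 ∈ arr := by
    rcases pvFB_mem l (0, a0) with h | h
    · rw [hr, h, harr]; exact List.mem_cons_self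
    · rw [← hsnd]; exact List.mem_map.mpr ⟨r, h, rfl⟩
  have hmin : PySem.List.min? arr (fun x => x) = some r.2 := min?_eq_of arr r.2 hr_mem_arr hr_le
  -- find? on l finds exactly r
  have hfind : l.find? (fun p => p.2 == r.2) = some r := by
    by_cases hlt : r.2 < a0
    · exact pvFB_find l (0, a0) hlt
    · have heq : r.2 = a0 := le_antisymm (pvFB_le l (0, a0)).1 (le_of_not_gt hlt)
      have hrb : r = ((0 : Int), a0) := by
        apply pvFB_stable
        intro p hp
        have h2 := (pvFB_le l (0, a0)).2 p hp
        have heq' : (pvFB l (0, a0)).2 = a0 := heq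
        show ¬ p.2 < a0
        omega
      rw [hl, harr, PySem.List.enumerate_cons, List.find?_cons]
      have : ((a0 : Int) == r.2) = true := by simp [heq]
      rw [this, hrb]
  -- now unfold both ports
  rw [get_next_large_index, get_next_large_index_alt, hmin, hc, h00]
  simp only [← hl]
  have hfoldB : List.foldl (fun (b : Int × Int) ie => if ie.2 < b.2 then ie else b) (0, a0) l = r := rfl
  rw [hfoldB]
  by_cases hmc : r.2 = c
  · rw [if_neg (by simp [hmc]), if_pos hmc]
  · rw [if_pos hmc, if_neg hmc]
    -- A's branch: m = r.2 < c
    have hmlt : r.2 < c := lt_of_le_of_ne (hr_le c hc_mem) hmc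
    rw [loopA1 c l ([], [])]
    simp only [List.nil_append]
    set fl := l.filter (fun p => decide (p.2 < c)) with hfl
    -- r is in the filtered list
    have hr_fl : r ∈ fl := by
      have hr_l : r ∈ l := by
        have := List.mem_of_find?_eq_some hfind
        exact this
      exact List.mem_filter.mpr ⟨hr_l, by simp [hmlt]⟩
    -- min of value_list is r.2
    have hvs_min : PySem.List.min? (fl.map (·.2)) (fun x => x) = some r.2 := by
      apply min?_eq_of
      · exact List.mem_map.mpr ⟨r, hr_fl, rfl⟩
      · intro y hy
        obtain ⟨p, hp, hpy⟩ := List.mem_map.mp hy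
        apply hr_le
        rw [← hsnd, ← hpy]
        exact List.mem_map.mpr ⟨p, (List.mem_filter.mp hp).1, rfl⟩
    rw [hvs_min]
    -- the second loop
    have hlen : (0 : Nat) + (fl.map (·.2)).length ≤ (fl.map (·.1)).length := by simp
    have := go_zip r.2 (fl.map (·.2)) 0 (fl.map (·.1)) hlen
    simp only [Nat.cast_zero, List.drop_zero] at this
    show pvGoA r.2 (fl.map (·.1)) 0 (fl.map (·.2)) = some r.1
    rw [this, List.zip_map']
    have hzip : fl.map (fun x => (x.1, x.2)) = fl := by simp
    rw [hzip]
    have : fl.find? (fun p => p.2 == r.2) = some r := by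
      rw [hfl, find?_filter_imp]
      · exact hfind
      · intro x hx
        simp at hx ⊢
        omega
    rw [this]
    rfl
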